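-- pv_equiv track=rewrite | github.com/Cosmicwanderer1/Lean4-RSR | src/data_engine/pipelines/consensus_pipeline_v2.py | _validate_skeleton
-- ===== SOURCE A (Python) =====
-- from typing import Optional, Dict, Any, List
--
-- def _validate_skeleton(skeleton: str) -> tuple[bool, List[str]]:
--     """
--     验证骨架质量，检测连续 sorry 等问题
--
--     Returns:
--         (is_valid, issues): 是否有效，以及问题列表
--     """
--     issues = []
--     lines = skeleton.split('\n')
--
--     # 检测连续 sorry
--     consecutive_sorry_count = 0
--     last_was_sorry = False
--     last_sorry_line = -1
--
--     for i, line in enumerate(lines):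
--         stripped = line.strip()
--
--         # 跳过空行和纯注释行
--         if not stripped or stripped.startswith('--'):
--             continue
--
--         if stripped == 'sorry':
--             if last_was_sorry:
--                 consecutive_sorry_count += 1
--                 if consecutive_sorry_count == 1:  # 第一次检测到连续
--                     issues.append(
--                         f"Consecutive sorry at lines {last_sorry_line + 1} and {i + 1} "
--                         f"(no guidance between them)"
--                     )
--             last_was_sorry = True
--             last_sorry_line = i
--         else:
--             last_was_sorry = False
--
--     # 检测 sorry 前是否有指导注释
--     sorry_without_guidance = []
--     for i, line in enumerate(lines):
--         if line.strip() == 'sorry':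
--             # 检查前面的行是否有指导性注释
--             has_guidance = False
--             for j in range(max(0, i - 5), i):  # 检查前5行
--                 prev_line = lines[j].strip()
--                 if prev_line.startswith('--') and len(prev_line) > 10:
--                     # 有一定长度的注释算作指导
--                     has_guidance = True
--                     break
--                 elif prev_line and not prev_line.startswith('--') and prev_line != 'sorry':
--                     # 有实际代码也算
--                     has_guidance = True
--                     break
--
--             if not has_guidance:
--                 sorry_without_guidance.append(i + 1)
--
--     if sorry_without_guidance:
--         issues.append(
--             f"Sorry without guidance at lines: {sorry_without_guidance}"
--         )
--
--     # 检测 sorry 数量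
--     sorry_count = skeleton.count('sorry')
--     if sorry_count > 10:
--         issues.append(f"Too many sorry ({sorry_count}), may indicate poor structure")
--
--     is_valid = len(issues) == 0
--     return is_valid, issues
-- ===== SOURCE B (Python) =====
-- from typing import List
--
--
-- def _validate_skeleton(skeleton: str) -> tuple[bool, List[str]]:
--     # Single fused pass with a bounded sliding window of the last 5 stripped
--     # lines; no second pass and no random access into the line list.
--     first_pair = None          # first adjacent pair of sorries (significant order)
--     missing: List[int] = []    # 1-based lines of sorry without guidance
--     window: List[str] = []     # stripped text of the previous <=5 lines
--     prev_sorry = None          # line index of previous significant line, if it was 'sorry'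
--
--     i = 0
--     for raw in skeleton.split('\n'):
--         s = raw.strip()
--         if s == 'sorry':
--             if not any((p.startswith('--') and len(p) > 10)
--                        or (p and not p.startswith('--') and p != 'sorry')
--                        for p in window):
--                 missing.append(i + 1)
--         if s and not s.startswith('--'):
--             if s == 'sorry':
--                 if prev_sorry is not None and first_pair is None:
--                     first_pair = (prev_sorry, i)
--                 prev_sorry = i
--             else:
--                 prev_sorry = None
--         window.append(s)
--         if len(window) > 5:
--             window.pop(0)
--         i += 1
--
--     issues = []
--     if first_pair is not None:
--         issues.append(
--             f"Consecutive sorry at lines {first_pair[0] + 1} and {first_pair[1] + 1} "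
--             f"(no guidance between them)"
--         )
--     if missing:
--         issues.append(f"Sorry without guidance at lines: {missing}")
--     sorry_count = skeleton.count('sorry')
--     if sorry_count > 10:
--         issues.append(f"Too many sorry ({sorry_count}), may indicate poor structure")
--     return len(issues) == 0, issues
-- ===== Notes on version B (the rewrite author's own statement) =====
-- stated objective: alternative
-- what changed: Replaces A's two separate enumerate-passes (a stateful consecutive-sorry scan plus a second pass doing indexed random-access look-back lines[j] over range(max(0,i-5),i)) by ONE fused streaming pass that maintains a bounded sliding window of the last 5 stripped lines, the previous significant-sorry index, the first sorry pair and the missing-guidance list simultaneously; no second traversal and no indexing into the line list at all.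
import Mathlib
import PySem

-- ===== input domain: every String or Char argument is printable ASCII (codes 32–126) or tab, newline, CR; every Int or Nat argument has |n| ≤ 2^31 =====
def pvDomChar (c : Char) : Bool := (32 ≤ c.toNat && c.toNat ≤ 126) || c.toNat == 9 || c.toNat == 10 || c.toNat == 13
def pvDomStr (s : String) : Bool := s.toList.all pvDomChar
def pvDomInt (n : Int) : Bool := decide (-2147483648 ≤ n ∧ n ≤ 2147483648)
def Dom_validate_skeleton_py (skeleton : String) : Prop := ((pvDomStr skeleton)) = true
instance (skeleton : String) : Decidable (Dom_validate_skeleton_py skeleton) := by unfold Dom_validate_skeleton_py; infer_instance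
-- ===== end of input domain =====

-- B fuses A's two enumerate-passes (stateful consecutive scan + indexed five-line look-back)
-- into ONE streaming pass over the lines carrying a bounded sliding window of the last 5
-- stripped lines; no second traversal and no random access (objective: alternative).

-- shared message formatting (both Pythons build the identical f-strings)
def pvMsgCons (lsl i : Int) : String :=
  "Consecutive sorry at lines " ++ PySem.Int.toStr (lsl + 1) ++ " and " ++ PySem.Int.toStr (i + 1) ++ " (no guidance between them)"

def pvMsgNoGuide (xs : List Int) : String :=
  "Sorry without guidance at lines: [" ++ PySem.Str.join ", " (xs.map PySem.Int.toStr) ++ "]"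

def pvMsgTooMany (n : Int) : String :=
  "Too many sorry (" ++ PySem.Int.toStr n ++ "), may indicate poor structure"

-- the guidance predicate on an already-stripped line (identical in both Pythons)
def pvGuidePred (p : String) : Bool :=
  (PySem.Str.startswith p "--" && decide (10 < PySem.Str.len p)) ||
  (!(p == "") && !PySem.Str.startswith p "--" && !(p == "sorry"))

-- ===== PORT A =====
-- first loop of A: state (i, consecutive_sorry_count, last_was_sorry, last_sorry_line, issues)
def pvA_loop1 : List String → Int → Int → Bool → Int → List String → List String
  | [], _, _, _, _, issues => issues
  | line :: rest, i, cc, lw, lsl, issues =>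
    let s := PySem.Str.strip line
    if s == "" || PySem.Str.startswith s "--" then
      pvA_loop1 rest (i + 1) cc lw lsl issues
    else if s == "sorry" then
      if lw then
        let cc' := cc + 1
        pvA_loop1 rest (i + 1) cc' true i (if cc' == 1 then issues ++ [pvMsgCons lsl i] else issues)
      else
        pvA_loop1 rest (i + 1) cc true i issues
    else
      pvA_loop1 rest (i + 1) cc false lsl issues

-- A's inner 'for j in range(max(0, i-5), i): … break' (break-on-true scan)
def pvA_guide (lines : List String) : List Int → Bool
  | [] => false
  | j :: js =>
    let p := PySem.Str.strip (PySem.List.pyGetD lines j "")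
    if PySem.Str.startswith p "--" && decide (10 < PySem.Str.len p) then true
    else if !(p == "") && !PySem.Str.startswith p "--" && !(p == "sorry") then true
    else pvA_guide lines js

-- second loop of A, accumulating sorry_without_guidance
def pvA_loop2 (lines : List String) : List String → Int → List Int → List Int
  | [], _, acc => acc
  | line :: rest, i, acc =>
    if PySem.Str.strip line == "sorry" then
      let hg := pvA_guide lines (PySem.List.pyRange (max 0 (i - 5)) i 1)
      pvA_loop2 lines rest (i + 1) (if hg then acc else acc ++ [i + 1])
    else
      pvA_loop2 lines rest (i + 1) acc

def validate_skeleton_py (skeleton : String) : Bool × List String :=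
  let lines := (PySem.Str.split? skeleton "\n").getD []
  let issues := pvA_loop1 lines 0 0 false (-1) []
  let swg := pvA_loop2 lines lines 0 []
  let issues := if swg.isEmpty then issues else issues ++ [pvMsgNoGuide swg]
  let sc : Int := (PySem.Str.count skeleton "sorry" : Int)
  let issues := if 10 < sc then issues ++ [pvMsgTooMany sc] else issues
  (issues.length == 0, issues)

-- ===== PORT B =====
-- B's single fused pass: state (i, window = last ≤5 stripped lines, prev_sorry, first_pair, missing)
def pvB_loop : List String → Int → List String → Option Int → Option (Int × Int) → List Int → Option (Int × Int) × List Int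
  | [], _, _, _, fp, missing => (fp, missing)
  | raw :: rest, i, window, prev, fp, missing =>
    let s := PySem.Str.strip raw
    let missing' := if s == "sorry" && !(window.any pvGuidePred) then missing ++ [i + 1] else missing
    let fp' := if (!(s == "") && !PySem.Str.startswith s "--") && s == "sorry" then
                 (match prev, fp with
                  | some p, none => some (p, i)
                  | _, f => f)
               else fp
    let prev' := if !(s == "") && !PySem.Str.startswith s "--" then
                   (if s == "sorry" then some i else none)
                 else prev
    let w := window ++ [s]
    pvB_loop rest (i + 1) (if 5 < w.length then w.drop 1 else w) prev' fp' missing'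

def validate_skeleton_py_alt (skeleton : String) : Bool × List String :=
  let lines := (PySem.Str.split? skeleton "\n").getD []
  let r := pvB_loop lines 0 [] none none []
  let issues := match r.1 with
    | some (a, b) => [pvMsgCons a b]
    | none => []
  let issues := if r.2.isEmpty then issues else issues ++ [pvMsgNoGuide r.2]
  let sc : Int := (PySem.Str.count skeleton "sorry" : Int)
  let issues := if 10 < sc then issues ++ [pvMsgTooMany sc] else issues
  (issues.length == 0, issues)

-- ===== PRECONDITION & SPEC =====
def Spec_validate_skeleton_py (skeleton : String) (out : Bool × List String) : Prop := out = validate_skeleton_py_alt skeleton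
instance (skeleton : String) (out : Bool × List String) : Decidable (Spec_validate_skeleton_py skeleton out) := by unfold Spec_validate_skeleton_py; infer_instance

-- ===== CLAIM (what is proved, stated in full; the proofs are below) =====
def Claim_equal_validate_skeleton_py : Prop := ∀ (skeleton : String), Dom_validate_skeleton_py skeleton → Spec_validate_skeleton_py skeleton (validate_skeleton_py skeleton)

-- ===== LEMMAS AND PROOFS =====

-- proof-side characterization of both programs: significant lines, first adjacent sorry pair,
-- slice-based guidance test, missing list
def pvC_sig : List String → Int → List (Int × String)
  | [], _ => []
  | s :: rest, i =>
    if !(s == "") && !PySem.Str.startswith s "--" then (i, s) :: pvC_sig rest (i + 1)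
    else pvC_sig rest (i + 1)

def pvC_firstPair : List (Int × String) → Option (Int × Int)
  | (a, sa) :: (b, sb) :: rest =>
    if sa == "sorry" && sb == "sorry" then some (a, b)
    else pvC_firstPair ((b, sb) :: rest)
  | _ => none

def pvC_guided (strip : List String) (i : Int) : Bool :=
  (PySem.List.slice strip (some (max 0 (i - 5))) (some i)).any pvGuidePred

def pvC_missing (strip : List String) : List String → Int → List Int
  | [], _ => []
  | s :: rest, i =>
    if s == "sorry" && !pvC_guided strip i then (i + 1) :: pvC_missing strip rest (i + 1)
    else pvC_missing strip rest (i + 1)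

def pvPairIssues : Option (Int × Int) → List String
  | some (a, b) => [pvMsgCons a b]
  | none => []

def pvPrevToks : Option Int → List (Int × String)
  | some p => [(p, "sorry")]
  | none => []

def pvFpRes (fp : Option (Int × Int)) (prev : Option Int) (sig : List (Int × String)) : Option (Int × Int) :=
  match fp with
  | some f => some f
  | none => pvC_firstPair (pvPrevToks prev ++ sig)

-- ---- A-side lemmas ----

theorem pvA_loop1_fired (rest : List String) :
    ∀ (i cc : Int) (lw : Bool) (lsl : Int) (issues : List String), 1 ≤ cc →
    pvA_loop1 rest i cc lw lsl issues = issues := by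
  induction rest with
  | nil => intro i cc lw lsl issues h; simp [pvA_loop1]
  | cons line rest ih =>
    intro i cc lw lsl issues h
    simp only [pvA_loop1]
    split_ifs with h1 h2 h3 h4
    · exact ih _ _ _ _ _ h
    · exfalso; simp at h4; omega
    · exact ih _ _ _ _ _ (by omega)
    · exact ih _ _ _ _ _ h
    · exact ih _ _ _ _ _ h

theorem pvC_firstPair_skip (i : Int) (s : String) (t : List (Int × String)) (hs : (s == "sorry") = false) :
    pvC_firstPair ((i, s) :: t) = pvC_firstPair t := by
  cases t with
  | nil => rfl
  | cons q t' =>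
    obtain ⟨b, sb⟩ := q
    simp [pvC_firstPair, hs]

theorem pvA_loop1_eq (rest : List String) :
    ∀ (i lsl : Int),
      pvA_loop1 rest i 0 false lsl [] = pvPairIssues (pvC_firstPair (pvC_sig (rest.map PySem.Str.strip) i)) ∧
      pvA_loop1 rest i 0 true lsl [] = pvPairIssues (pvC_firstPair ((lsl, "sorry") :: pvC_sig (rest.map PySem.Str.strip) i)) := by
  induction rest with
  | nil => intro i lsl; constructor <;> simp [pvA_loop1, pvC_sig, pvC_firstPair, pvPairIssues]
  | cons line rest ih =>
    intro i lsl
    simp only [pvA_loop1, List.map_cons, pvC_sig]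
    by_cases h1 : (PySem.Str.strip line == "" || PySem.Str.startswith (PySem.Str.strip line) "--") = true
    · -- insignificant line: both sides skip
      have h1' : (!(PySem.Str.strip line == "") && !PySem.Str.startswith (PySem.Str.strip line) "--") = false := by
        cases hb : (PySem.Str.strip line == "") <;> simp_all
      simp only [h1, if_true, h1', Bool.false_eq_true, if_false]
      exact ih (i + 1) lsl
    · have h1' : (!(PySem.Str.strip line == "") && !PySem.Str.startswith (PySem.Str.strip line) "--") = true := by
        cases hb : (PySem.Str.strip line == "") <;> simp_all
      rw [Bool.not_eq_true] at h1
      simp only [h1, Bool.false_eq_true, if_false, h1', if_true]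
      by_cases h2 : (PySem.Str.strip line == "sorry") = true
      · have hs : PySem.Str.strip line = "sorry" := by simpa using h2
        simp only [hs]
        constructor
        · -- lw = false, hits a sorry: switch to the lw = true conjunct
          try simp only [Bool.false_eq_true, reduceIte]
          exact (ih (i + 1) i).2
        · -- lw = true: the pair fires on both sides
          have : ((0 : Int) + 1 == 1) = true := by decide
          simp only [reduceIte, this, List.nil_append]
          rw [pvA_loop1_fired rest (i + 1) (0 + 1) true i [pvMsgCons lsl i] (by omega)]
          simp [pvC_firstPair, pvPairIssues]
      · rw [Bool.not_eq_true] at h2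
        simp only [h2, Bool.false_eq_true, if_false]
        have hskip : pvC_firstPair ((i, PySem.Str.strip line) :: pvC_sig (rest.map PySem.Str.strip) (i + 1)) = pvC_firstPair (pvC_sig (rest.map PySem.Str.strip) (i + 1)) :=
          pvC_firstPair_skip _ _ _ h2
        constructor
        · rw [hskip]; exact (ih (i + 1) lsl).1
        · simp only [pvC_firstPair, h2]
          rw [hskip]
          exact (ih (i + 1) lsl).1

theorem pvA_guide_any (lines : List String) (js : List Int) :
    pvA_guide lines js = js.any (fun j => pvGuidePred (PySem.Str.strip (PySem.List.pyGetD lines j ""))) := by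
  induction js with
  | nil => rfl
  | cons j js ih =>
    simp only [pvA_guide, List.any_cons, pvGuidePred, ih]
    set p := PySem.Str.strip (PySem.List.pyGetD lines j "") with hp
    cases hc1 : (PySem.Str.startswith p "--" && decide (10 < PySem.Str.len p)) <;>
      cases hc2 : (!(p == "") && !PySem.Str.startswith p "--" && !(p == "sorry")) <;>
        simp

theorem pvMapRange {α β : Type} (f : α → β) (d : α) (xs : List α) (a b : Int)
    (h0 : 0 ≤ a) (hab : a ≤ b) (hb : b ≤ xs.length) :
    (PySem.List.pyRange a b 1).map (fun j => f (PySem.List.pyGetD xs j d)) =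
      PySem.List.slice (xs.map f) (some a) (some b) := by
  have hmb : (b : Int) ≤ ((xs.map f).length : Int) := by simpa using hb
  have hma : (a : Int) ≤ ((xs.map f).length : Int) := le_trans hab hmb
  apply List.ext_getElem
  · rw [List.length_map, PySem.List.length_pyRange_one,
      PySem.List.slice_of_nonneg _ h0 (le_trans h0 hab) hma hmb]
    simp only [List.length_take, List.length_drop, List.length_map]
    omega
  · intro k h1 h2
    have hk : k < (b - a).toNat := by
      simpa [PySem.List.length_pyRange_one] using h1
    rw [List.getElem_map, PySem.List.getElem_pyRange_one]
    simp only [PySem.List.slice_of_nonneg _ h0 (le_trans h0 hab) hma hmb,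
      List.getElem_take, List.getElem_drop, List.getElem_map]
    congr 1
    rw [PySem.List.pyGetD_eq_getElem xs d (by omega) (by omega)]
    congr 1
    omega

theorem pvGuide_eq (lines : List String) (i : Int) (h0 : 0 ≤ i) (hi : i ≤ lines.length) :
    pvA_guide lines (PySem.List.pyRange (max 0 (i - 5)) i 1) = pvC_guided (lines.map PySem.Str.strip) i := by
  rw [pvA_guide_any, pvC_guided]
  have := pvMapRange PySem.Str.strip "" lines (max 0 (i - 5)) i (by omega) (by omega) (by simpa using hi)
  rw [← this, List.any_map]
  simp only [Function.comp_def]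

theorem pvA_loop2_eq (lines : List String) (rest : List String) :
    ∀ (i : Int) (acc : List Int), 0 ≤ i → i + rest.length = lines.length →
    pvA_loop2 lines rest i acc = acc ++ pvC_missing (lines.map PySem.Str.strip) (rest.map PySem.Str.strip) i := by
  induction rest with
  | nil => intro i acc _ _; simp [pvA_loop2, pvC_missing]
  | cons line rest ih =>
    intro i acc h0 hlen
    simp only [pvA_loop2, List.map_cons, pvC_missing]
    have hg : pvA_guide lines (PySem.List.pyRange (max 0 (i - 5)) i 1) = pvC_guided (lines.map PySem.Str.strip) i := by
      apply pvGuide_eq lines i h0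
      simp only [List.length_cons] at hlen
      omega
    by_cases hs : (PySem.Str.strip line == "sorry") = true
    · simp only [hs, if_true, Bool.true_and, hg]
      cases hgv : pvC_guided (lines.map PySem.Str.strip) i with
      | true =>
        simp only [Bool.not_true, Bool.false_eq_true, if_false, if_true]
        exact ih (i + 1) acc (by omega) (by simp only [List.length_cons] at hlen; omega)
      | false =>
        simp only [Bool.not_false, Bool.false_eq_true, if_false, if_true]
        rw [ih (i + 1) (acc ++ [i + 1]) (by omega) (by simp only [List.length_cons] at hlen; omega)]
        simp
    · rw [Bool.not_eq_true] at hs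
      simp only [hs, Bool.false_eq_true, if_false, Bool.false_and]
      exact ih (i + 1) acc (by omega) (by simp only [List.length_cons] at hlen; omega)

-- ---- B-side lemmas ----

-- the ≤5-slice ending at pre.length of pre ++ suf is the last ≤5 elements of pre
theorem pvSliceWindow (pre suf : List String) :
    PySem.List.slice (pre ++ suf) (some (max 0 ((pre.length : Int) - 5))) (some (pre.length : Int)) = pre.drop (pre.length - 5) := by
  have h0 : (0:Int) ≤ max 0 ((pre.length : Int) - 5) := le_max_left _ _
  have hb : (0:Int) ≤ (pre.length : Int) := by positivity
  have hma : max 0 ((pre.length : Int) - 5) ≤ (((pre ++ suf).length : Int)) := by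
    simp [List.length_append]; omega
  have hmb : ((pre.length : Int)) ≤ (((pre ++ suf).length : Int)) := by
    simp [List.length_append]
  rw [PySem.List.slice_of_nonneg _ h0 hb hma hmb]
  have h1 : (max 0 ((pre.length:Int) - 5)).toNat = pre.length - 5 := by omega
  have h2 : ((pre.length:Int)).toNat = pre.length := by omega
  rw [h1, h2, List.drop_append_of_le_length (by omega)]
  have h3 : pre.length - (pre.length - 5) = (pre.drop (pre.length - 5)).length := by
    simp [List.length_drop]
  rw [h3, List.take_left]

-- appending the new stripped line and trimming keeps "window = last ≤5 of pre"
theorem pvWindowStep (pre : List String) (s : String) :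
    (if 5 < (pre.drop (pre.length - 5) ++ [s]).length then (pre.drop (pre.length - 5) ++ [s]).drop 1 else pre.drop (pre.length - 5) ++ [s]) = (pre ++ [s]).drop ((pre ++ [s]).length - 5) := by
  have hkey : pre.drop (pre.length - 5) ++ [s] = (pre ++ [s]).drop (pre.length - 5) := by
    rw [List.drop_append_of_le_length (by omega)]
  rw [hkey]
  by_cases h : 5 ≤ pre.length
  · have hc : 5 < ((pre ++ [s]).drop (pre.length - 5)).length := by
      simp [List.length_drop, List.length_append]; omega
    rw [if_pos hc, List.drop_drop]
    congr 1
    simp [List.length_append]; omega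
  · have hc : ¬ 5 < ((pre ++ [s]).drop (pre.length - 5)).length := by
      simp [List.length_drop, List.length_append]; omega
    rw [if_neg hc]
    congr 1
    simp [List.length_append]; omega

theorem pvB_loop_eq (rest : List String) :
    ∀ (pre : List String) (prev : Option Int) (fp : Option (Int × Int)) (missing : List Int),
    pvB_loop rest (pre.length : Int) (pre.drop (pre.length - 5)) prev fp missing =
      (pvFpRes fp prev (pvC_sig (rest.map PySem.Str.strip) (pre.length : Int)),
       missing ++ pvC_missing (pre ++ rest.map PySem.Str.strip) (rest.map PySem.Str.strip) (pre.length : Int)) := by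
  induction rest with
  | nil =>
    intro pre prev fp missing
    simp only [pvB_loop, List.map_nil, pvC_sig, pvC_missing, List.append_nil]
    cases fp with
    | some f => rfl
    | none => cases prev <;> simp [pvFpRes, pvPrevToks, pvC_firstPair]
  | cons raw rest ih =>
    intro pre prev fp missing
    simp only [pvB_loop, List.map_cons]
    set s := PySem.Str.strip raw with hs_def
    have hwin : pvC_guided (pre ++ (s :: rest.map PySem.Str.strip)) ((pre.length : Int)) = (pre.drop (pre.length - 5)).any pvGuidePred := by
      rw [pvC_guided, pvSliceWindow]
    have hcast : ((pre.length : Int)) + 1 = (((pre ++ [s]).length : Int)) := by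
      simp [List.length_append]
    have hL : (pre ++ [s]) ++ rest.map PySem.Str.strip = pre ++ (s :: rest.map PySem.Str.strip) := by
      simp
    rw [pvWindowStep, hcast, ih]
    rw [hL, ← hcast]
    -- now compare the two pairs componentwise
    refine Prod.ext ?_ ?_
    · show pvFpRes _ _ _ = pvFpRes fp prev (pvC_sig (s :: rest.map PySem.Str.strip) ((pre.length : Int)))
      by_cases hsor : (s == "sorry") = true
      · have hse : s = "sorry" := by simpa using hsor
        have hsig : (!(s == "") && !PySem.Str.startswith s "--") = true := by rw [hse]; decide
        simp only [pvC_sig, hsig, hsor, Bool.and_true, if_pos]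
        cases fp with
        | some f =>
          have hm : (match prev, some f with
              | some p, none => some (p, (pre.length : Int))
              | _, f => f : Option (Int × Int)) = some f := by cases prev <;> rfl
          rw [hm]; simp [pvFpRes]
        | none =>
          cases prev with
          | some p =>
            simp [pvFpRes, pvPrevToks, pvC_firstPair, hse]
          | none =>
            simp [pvFpRes, pvPrevToks, hse]
      · have hsorF : (s == "sorry") = false := by simpa using hsor
        simp only [hsorF, Bool.and_false, Bool.false_eq_true, if_false]
        by_cases hsig : (!(s == "") && !PySem.Str.startswith s "--") = true
        · simp only [pvC_sig, hsig, if_pos]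
          cases fp with
          | some f => simp [pvFpRes]
          | none =>
            simp only [pvFpRes, pvPrevToks, List.nil_append]
            cases prev with
            | none => exact (pvC_firstPair_skip _ s _ hsorF).symm
            | some p =>
              show pvC_firstPair _ = pvC_firstPair ((p, "sorry") :: ((pre.length : Int), s) :: pvC_sig (rest.map PySem.Str.strip) ((pre.length : Int) + 1))
              rw [show pvC_firstPair ((p, "sorry") :: ((pre.length : Int), s) :: pvC_sig (rest.map PySem.Str.strip) ((pre.length : Int) + 1)) = pvC_firstPair (((pre.length : Int), s) :: pvC_sig (rest.map PySem.Str.strip) ((pre.length : Int) + 1)) from by simp [pvC_firstPair, hsorF]]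
              rw [pvC_firstPair_skip _ s _ hsorF]
        · have hsigF : (!(s == "") && !PySem.Str.startswith s "--") = false := by simpa using hsig
          simp only [pvC_sig, hsigF, Bool.false_eq_true, if_false]
    · show _ ++ _ = missing ++ pvC_missing (pre ++ (s :: rest.map PySem.Str.strip)) (s :: rest.map PySem.Str.strip) ((pre.length : Int))
      rw [← hwin]
      simp only [pvC_missing]
      cases hcond : (s == "sorry" && !pvC_guided (pre ++ (s :: rest.map PySem.Str.strip)) ((pre.length : Int))) <;>
        simp

-- ===== VERDICT (by name: the statement is the Claim_ definition above) =====
theorem validate_skeleton_py_spec : Claim_equal_validate_skeleton_py := by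
  intro skeleton _
  show validate_skeleton_py skeleton = validate_skeleton_py_alt skeleton
  simp only [validate_skeleton_py, validate_skeleton_py_alt]
  have hB := pvB_loop_eq ((PySem.Str.split? skeleton "\n").getD []) [] none none []
  simp only [List.length_nil, Nat.cast_zero, List.drop_nil, List.nil_append, Nat.zero_sub] at hB
  simp only [hB,(pvA_loop1_eq ((PySem.Str.split? skeleton "\n").getD []) 0 (-1)).1,
    pvA_loop2_eq ((PySem.Str.split? skeleton "\n").getD []) ((PySem.Str.split? skeleton "\n").getD []) 0 []
      (by omega) (by omega),
    List.nil_append, pvFpRes, List.nil_append]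
  cases hfp : pvC_firstPair (pvC_sig (((PySem.Str.split? skeleton "\n").getD []).map PySem.Str.strip) 0) with
  | none => simp [pvPairIssues, pvPrevToks, hfp]
  | some p => obtain ⟨a, b⟩ := p; simp [pvPairIssues, pvPrevToks, hfp]
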